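-- pv_equiv track=rewrite | github.com/ga5am3/levitador_stm32 | testing/kalman_compare_enhanced.py | matmul_fixed
-- ===== SOURCE A (Python) =====
-- FRACTIONAL_BITS = 11  # Update to match the C code (11 instead of 14)
--
-- def matmul_fixed(A, B):
--     rows_A = len(A)
--     cols_A = len(A[0])
--     cols_B = len(B[0])
--
--     C = [[0 for _ in range(cols_B)] for _ in range(rows_A)]
--
--     for i in range(rows_A):
--         for j in range(cols_B):
--             sum_val = 0
--             for k in range(cols_A):
--                 sum_val += (A[i][k] * B[k][j])
--             # Apply rounding before shifting
--             C[i][j] = (sum_val + (1 << (FRACTIONAL_BITS - 1))) >> FRACTIONAL_BITS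
--
--     return C
-- ===== SOURCE B (Python) =====
-- FRACTIONAL_BITS = 11  # Update to match the C code (11 instead of 14)
--
-- def matmul_fixed(A, B):
--     cols_A = len(A[0])
--     cols_B = len(B[0])
--     if cols_B == 0:
--         return [[] for _ in A]
--     # accumulate the raw product as a sum of rank-1 (outer-product) updates:
--     # for each k, add A[:,k] (scaled) times row B[k] into the running matrix R
--     R = [[0] * cols_B for _ in A]
--     for k in range(cols_A):
--         bk = B[k]
--         for arow, Ri in zip(A, R):
--             aik = arow[k]
--             for j in range(cols_B):
--                 Ri[j] += aik * bk[j]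
--     # separate quantization pass
--     half = 1 << (FRACTIONAL_BITS - 1)
--     return [[(r + half) >> FRACTIONAL_BITS for r in row] for row in R]
-- ===== Notes on version B (the rewrite author's own statement) =====
-- stated objective: alternative
-- what changed: B computes the raw product as a sum of rank-1 outer-product updates (k-outer kij loop order accumulating the whole matrix in place) and then quantizes every entry in a separate pass, instead of A's per-cell dot-product triple loop with fused rounding.
import Mathlib
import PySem

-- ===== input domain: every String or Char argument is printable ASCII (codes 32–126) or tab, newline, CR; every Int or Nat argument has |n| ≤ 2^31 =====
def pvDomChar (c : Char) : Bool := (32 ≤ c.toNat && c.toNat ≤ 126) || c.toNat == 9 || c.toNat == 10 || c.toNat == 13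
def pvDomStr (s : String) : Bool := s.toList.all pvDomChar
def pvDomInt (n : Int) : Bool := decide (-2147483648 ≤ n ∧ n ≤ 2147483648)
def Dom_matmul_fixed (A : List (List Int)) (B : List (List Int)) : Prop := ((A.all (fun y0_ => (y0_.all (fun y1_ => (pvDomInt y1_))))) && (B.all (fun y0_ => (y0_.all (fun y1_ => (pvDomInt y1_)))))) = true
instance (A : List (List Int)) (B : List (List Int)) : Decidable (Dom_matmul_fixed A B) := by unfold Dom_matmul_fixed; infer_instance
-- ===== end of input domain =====

-- B accumulates the raw product as a sum of rank-1 outer-product updates (k-outer loop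
-- order) and quantizes in a separate pass, instead of A's fused per-cell dot-product
-- triple loop (objective: alternative decomposition).


-- ===== PORT A =====
-- Literal port of A's triple loop; A[0]/B[0] are headD (Pre_ guarantees nonemptiness),
-- A[i][k]/B[k][j] are getD (Pre_ guarantees the indices are in range whenever they are
-- reached), and Python's arithmetic '>> 11' on int is exactly floor division by 2^11.
def matmul_fixed (A : List (List Int)) (B : List (List Int)) : List (List Int) :=
  let rows_A := A.length
  let cols_A := (A.headD []).length
  let cols_B := (B.headD []).length
  (List.range rows_A).map (fun i =>
    (List.range cols_B).map (fun j =>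
      let sum_val := (List.range cols_A).foldl
        (fun s k => s + (A.getD i []).getD k 0 * (B.getD k []).getD j 0) 0
      PySem.Int.floordiv (sum_val + ((1 : Int) <<< (11 - 1))) (2 ^ 11)))

-- ===== PORT B =====
-- Port of Source B: k-outer accumulation of rank-1 updates into a running matrix R
-- (Python's in-place 'Ri[j] += aik*bk[j]' over zip(A, R) becomes rebuilding R as a
-- map over A.zip R), then a separate quantization pass ('>> 11' = floordiv by 2^11).
def matmul_fixed_alt (A : List (List Int)) (B : List (List Int)) : List (List Int) :=
  let cols_A := (A.headD []).length
  let cols_B := (B.headD []).length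
  if cols_B = 0 then A.map (fun _ => []) else
    let R := (List.range cols_A).foldl (fun R k =>
        let bk := B.getD k []
        (A.zip R).map (fun p =>
          (List.range cols_B).map (fun j => p.2.getD j 0 + p.1.getD k 0 * bk.getD j 0)))
      (A.map (fun _ => List.replicate cols_B (0 : Int)))
    let half : Int := (1 : Int) <<< (11 - 1)
    R.map (fun row => row.map (fun r => PySem.Int.floordiv (r + half) (2 ^ 11)))

-- ===== PRECONDITION & SPEC =====
-- Exactly the inputs on which Python A returns normally: A and B nonempty (A[0], B[0]
-- are read unconditionally); when cols_B > 0, every row of A has at least cols_A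
-- entries and the first cols_A rows of B exist and have at least cols_B entries
-- (when cols_B = 0 the inner loops never index anything).
def Pre_matmul_fixed (A : List (List Int)) (B : List (List Int)) : Prop :=
  A ≠ [] ∧ B ≠ [] ∧
  ((B.headD []).length = 0 ∨
    ((∀ row ∈ A, (A.headD []).length ≤ row.length) ∧
     (A.headD []).length ≤ B.length ∧
     (∀ row ∈ B.take (A.headD []).length, (B.headD []).length ≤ row.length)))
instance (A : List (List Int)) (B : List (List Int)) : Decidable (Pre_matmul_fixed A B) := by
  unfold Pre_matmul_fixed; infer_instance

def pvWitness_matmul_fixed : List (List Int) × List (List Int) :=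
  ([[1, 2], [3, 4]], [[2048, 0], [0, 2048]])

def Spec_matmul_fixed (A : List (List Int)) (B : List (List Int)) (out : List (List Int)) : Prop := out = matmul_fixed_alt A B
instance (A : List (List Int)) (B : List (List Int)) (out : List (List Int)) : Decidable (Spec_matmul_fixed A B out) := by unfold Spec_matmul_fixed; infer_instance

-- ===== CLAIM (what is proved, stated in full; the proofs are below) =====
def Claim_equal_matmul_fixed : Prop := ∀ (A : List (List Int)) (B : List (List Int)), Dom_matmul_fixed A B → Pre_matmul_fixed A B → Spec_matmul_fixed A B (matmul_fixed A B)

-- ===== LEMMAS AND PROOFS =====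

-- A map over range l.length with positional getD is a map over l itself.
lemma map_range_getD {α β : Type} (l : List α) (d : α) (f : α → β) :
    (List.range l.length).map (fun i => f (l.getD i d)) = l.map f := by
  induction l with
  | nil => simp
  | cons x xs ih =>
    rw [List.length_cons, List.range_succ_eq_map, List.map_cons, List.map_map]
    simp only [Function.comp_def, List.getD_cons_succ, List.getD_cons_zero]
    rw [ih, List.map_cons]

-- Mapping over a list zipped with its own map.
lemma map_zip_self_map {α β γ : Type} (l : List α) (f : α → β) (g : α × β → γ) :
    (l.zip (l.map f)).map g = l.map (fun a => g (a, f a)) := by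
  induction l with
  | nil => simp
  | cons x xs ih => simp [ih]

-- getD on a map over a range, inside the range.
lemma getD_map_range (m j : ℕ) (f : ℕ → Int) (h : j < m) :
    ((List.range m).map f).getD j 0 = f j := by
  rw [List.getD_eq_getElem?_getD, List.getElem?_map, List.getElem?_range h]
  rfl

-- Invariant of B's k-outer accumulation: after n rank-1 updates the running matrix
-- holds, per row of A and column index j, the partial dot product over k < n.
lemma fold_inv (A B : List (List Int)) (cols_B : ℕ) (n : ℕ) :
    (List.range n).foldl (fun R k =>
        let bk := B.getD k []
        (A.zip R).map (fun p =>
          (List.range cols_B).map (fun j => p.2.getD j 0 + p.1.getD k 0 * bk.getD j 0)))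
      (A.map (fun _ => List.replicate cols_B (0 : Int)))
    = A.map (fun row => (List.range cols_B).map (fun j =>
        (List.range n).foldl (fun s k => s + row.getD k 0 * (B.getD k []).getD j 0) 0)) := by
  induction n with
  | zero =>
    simp only [List.range_zero, List.foldl_nil]
    exact (List.map_congr_left (fun a _ => by simp [List.map_const'])).symm
  | succ m ih =>
    rw [List.range_succ, List.foldl_append, List.foldl_cons, List.foldl_nil, ih,
      map_zip_self_map]
    apply List.map_congr_left
    intro row _
    apply List.map_congr_left
    intro j hj
    rw [List.foldl_append, List.foldl_cons, List.foldl_nil,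
      getD_map_range _ j _ (List.mem_range.mp hj)]

-- ===== VERDICT (by name: the statement is the Claim_ definition above) =====
theorem matmul_fixed_spec : Claim_equal_matmul_fixed := by
  intro A B _ _
  unfold Spec_matmul_fixed matmul_fixed matmul_fixed_alt
  simp only []
  by_cases h0 : (B.headD []).length = 0
  · rw [List.headD_eq_head?_getD, List.length_eq_zero_iff] at h0
    simp [h0, List.map_const']
  · rw [if_neg h0, fold_inv, List.map_map,
      map_range_getD A [] (fun row =>
        (List.range (B.headD []).length).map (fun j =>
          PySem.Int.floordiv
            ((List.range (A.headD []).length).foldl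
              (fun s k => s + row.getD k 0 * (B.getD k []).getD j 0) 0 + ((1 : Int) <<< (11 - 1)))
            (2 ^ 11)))]
    simp [Function.comp_def]
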